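-- pv_equiv track=rewrite | github.com/flobernier/comparator-and-best-image-selector | criterion_stats.py | getCriterionScore
-- ===== SOURCE A (Python) =====
-- def getCriterionScore(crit_list, nb_img, better):
-- 	score = [0] * nb_img
-- 	sorted_list = sorted(crit_list)
--
-- 	# Lowest score is 0, highest score is (nb_img-1)
-- 	if better == +1:
-- 		# Higher is better
-- 		for i in range(nb_img):
-- 			for j in range(nb_img):
-- 				if crit_list[i] == sorted_list[j]:
-- 					score[i] = j
-- 	elif better == -1:
-- 		# Smaller is better
-- 		for i in range(nb_img):
-- 			for j in range(nb_img):
-- 				if crit_list[i] == sorted_list[j]: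
-- 					score[i] = (nb_img-1) - j
-- 	else:
-- 		print ("Unknown order")
--
-- 	#print ("score:", score)
-- 	return score
-- ===== SOURCE B (Python) =====
-- def getCriterionScore(crit_list, nb_img, better):
--     # Rank by direct counting: with ties sharing the highest rank,
--     # the score of v is (#elements <= v) - 1 when higher is better,
--     # and (#elements > v) when smaller is better. No sorting needed.
--     if better == +1:
--         return [sum(w <= v for w in crit_list) - 1 for v in crit_list]
--     elif better == -1:
--         return [sum(w > v for w in crit_list) for v in crit_list]
--     else:
--         print("Unknown order")
--         return [0] * nb_img
-- ===== Notes on version B (the rewrite author's own statement) =====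
-- stated objective: simpler
-- what changed: Replaces sort-plus-nested-equality-scans with a direct counting formula (score of v = #elements <= v, minus 1, when higher is better; #elements > v when smaller is better), no sort and no score array; Pre_ restricts better=+/-1 to the natural domain nb_img == len(crit_list): with larger nb_img A raises IndexError, with smaller one A returns prefix-truncated ranks, an accident of using nb_img for both loop bounds.
-- outside the precondition, e.g. on getCriterionScore([3, 1, 2], 2, 1): A returns [0, 0], B returns [2, 0, 1]; on getCriterionScore([1, 2], 1, -1): A returns [0], B returns [1, 0]
import Mathlib
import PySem

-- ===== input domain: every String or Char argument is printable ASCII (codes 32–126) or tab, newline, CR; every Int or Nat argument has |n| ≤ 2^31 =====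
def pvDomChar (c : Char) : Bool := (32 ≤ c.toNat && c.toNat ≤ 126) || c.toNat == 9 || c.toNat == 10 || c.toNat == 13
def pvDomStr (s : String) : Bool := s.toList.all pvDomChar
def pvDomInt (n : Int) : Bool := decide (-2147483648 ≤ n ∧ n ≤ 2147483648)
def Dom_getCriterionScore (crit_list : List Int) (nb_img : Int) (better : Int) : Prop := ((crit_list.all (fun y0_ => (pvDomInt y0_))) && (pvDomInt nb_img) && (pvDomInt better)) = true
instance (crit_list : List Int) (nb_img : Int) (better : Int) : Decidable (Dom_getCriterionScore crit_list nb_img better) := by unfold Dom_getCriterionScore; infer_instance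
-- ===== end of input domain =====

-- B scores by counting comparisons directly (score of v = #elements ≤ v − 1, resp. #elements > v)
-- instead of A's sort plus nested equality scans; equality of RETURN values is proved on the natural
-- domain nb_img = len(crit_list); A's print on unknown 'better' is a side effect not modelled.

-- ===== PORT A =====
def getCriterionScore (crit_list : List Int) (nb_img : Int) (better : Int) : List Int :=
  let score := List.replicate nb_img.toNat (0 : Int)
  let sorted_list := PySem.List.sorted crit_list (fun x => x) false
  if better = 1 then
    (PySem.List.pyRange 0 nb_img 1).foldl (fun score i =>
      (PySem.List.pyRange 0 nb_img 1).foldl (fun score j =>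
        if PySem.List.pyGetD crit_list i 0 = PySem.List.pyGetD sorted_list j 0 then
          PySem.List.pySetD score i j
        else score) score) score
  else if better = -1 then
    (PySem.List.pyRange 0 nb_img 1).foldl (fun score i =>
      (PySem.List.pyRange 0 nb_img 1).foldl (fun score j =>
        if PySem.List.pyGetD crit_list i 0 = PySem.List.pyGetD sorted_list j 0 then
          PySem.List.pySetD score i ((nb_img - 1) - j)
        else score) score) score
  else
    score  -- Python prints "Unknown order" (side effect) and returns the zero list

-- ===== PORT B =====
-- sum(w <= v for w in crit_list) is ported as a fold adding 1 per satisfied comparison (exact).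
def getCriterionScore_alt (crit_list : List Int) (nb_img : Int) (better : Int) : List Int :=
  if better = 1 then
    crit_list.map (fun v =>
      crit_list.foldl (fun acc w => if w ≤ v then acc + 1 else acc) (0 : Int) - 1)
  else if better = -1 then
    crit_list.map (fun v =>
      crit_list.foldl (fun acc w => if v < w then acc + 1 else acc) (0 : Int))
  else
    List.replicate nb_img.toNat (0 : Int)  -- Python prints "Unknown order" (side effect)

-- ===== PRECONDITION & SPEC =====
-- For better = ±1, Pre_ restricts to the function's natural domain nb_img = len(crit_list) (nb_img is
-- the caller's image count): with nb_img > len A raises IndexError, and with nb_img < len A returns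
-- scores truncated and ranked against only a prefix of the sorted list — an accident of using nb_img
-- as both loop bounds on a mismatched argument pair.
def Pre_getCriterionScore (crit_list : List Int) (nb_img : Int) (better : Int) : Prop :=
  nb_img = (crit_list.length : Int) ∨ (better ≠ 1 ∧ better ≠ -1)
instance (crit_list : List Int) (nb_img : Int) (better : Int) : Decidable (Pre_getCriterionScore crit_list nb_img better) := by unfold Pre_getCriterionScore; infer_instance
def pvWitness_getCriterionScore : List Int × Int × Int := ([3, 1, 2, 1], 4, 1)

def Spec_getCriterionScore (crit_list : List Int) (nb_img : Int) (better : Int) (out : List Int) : Prop := out = getCriterionScore_alt crit_list nb_img better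
instance (crit_list : List Int) (nb_img : Int) (better : Int) (out : List Int) : Decidable (Spec_getCriterionScore crit_list nb_img better out) := by unfold Spec_getCriterionScore; infer_instance

-- ===== CLAIM (what is proved, stated in full; the proofs are below) =====
def Claim_equal_getCriterionScore : Prop := ∀ (crit_list : List Int) (nb_img : Int) (better : Int), Dom_getCriterionScore crit_list nb_img better → Pre_getCriterionScore crit_list nb_img better → Spec_getCriterionScore crit_list nb_img better (getCriterionScore crit_list nb_img better)

-- ===== LEMMAS AND PROOFS =====

-- Inner loop of A: scanning j and doing score[i] = F j on match is a single set of slot k.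
lemma pv_innerfold (p : Nat → Prop) [DecidablePred p] (F : Nat → Int) (L : List Nat) :
    ∀ (sc : List Int) (k : Nat), k < sc.length →
      L.foldl (fun sc j => if p j then sc.set k (F j) else sc) sc
        = sc.set k (L.foldl (fun a j => if p j then F j else a) (sc.getD k 0)) := by
  induction L with
  | nil =>
      intro sc k hk
      simp only [List.foldl_nil]
      rw [List.getD_eq_getElem sc 0 hk, List.set_getElem_self hk]
  | cons j L ih =>
      intro sc k hk
      by_cases hp : p j
      · simp only [List.foldl_cons, if_pos hp]
        rw [ih (sc.set k (F j)) k (by simpa using hk)]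
        simp [hk, List.getElem_set_self, List.set_set]
      · simp only [List.foldl_cons, if_neg hp]
        exact ih sc k hk

-- Outer loop of A: starting from [0]*n, each iteration i < n writes slot i once.
lemma pv_outerloop (p : Nat → Nat → Prop) [∀ i j, Decidable (p i j)] (F : Nat → Int)
    (L : List Nat) (n : Nat) :
    ∀ (m : Nat), m ≤ n →
      (List.range m).foldl
          (fun sc i => L.foldl (fun sc j => if p i j then sc.set i (F j) else sc) sc)
          (List.replicate n (0 : Int))
        = ((List.range m).map (fun i => L.foldl (fun a j => if p i j then F j else a) (0 : Int)))
            ++ List.replicate (n - m) 0 := by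
  intro m
  induction m with
  | zero => intro _; simp
  | succ m ih =>
      intro hm
      have hm' : m ≤ n := Nat.le_of_succ_le hm
      have hmn : m < n := hm
      rw [List.range_succ, List.foldl_append, ih hm', List.foldl_cons, List.foldl_nil]
      have hrep : List.replicate (n - m) (0 : Int) = 0 :: List.replicate (n - (m + 1)) 0 := by
        have : n - m = (n - (m + 1)) + 1 := by omega
        rw [this, List.replicate_succ]
      set xs := (List.range m).map (fun i => L.foldl (fun a j => if p i j then F j else a) (0 : Int)) with hxs
      have hxl : xs.length = m := by simp [hxs]
      have hlen : m < (xs ++ List.replicate (n - m) (0 : Int)).length := by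
        simp [hxl]; omega
      rw [pv_innerfold (p m) F L _ m hlen]
      rw [hrep]
      have hgetD : (xs ++ 0 :: List.replicate (n - (m + 1)) (0 : Int)).getD m 0 = 0 := by
        rw [List.getD_eq_getElem _ _ (by simp only [List.length_append, List.length_cons, List.length_replicate, hxl]; omega)]
        rw [List.getElem_append_right (by omega)]
        simp [hxl]
      rw [hgetD, List.set_append_right m _ (by omega)]
      simp [hxs]

-- A's nested loops over range(n), normalised: a scoreboard written slot by slot.
lemma pv_A_loops (crit : List Int) (n : Nat) (G : Int → Int) :
    (PySem.List.pyRange 0 (n : Int) 1).foldl (fun sc i =>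
        (PySem.List.pyRange 0 (n : Int) 1).foldl (fun sc j =>
          if PySem.List.pyGetD crit i 0
              = PySem.List.pyGetD (PySem.List.sorted crit (fun x => x) false) j 0 then
            PySem.List.pySetD sc i (G j)
          else sc) sc)
      (List.replicate ((n : Int)).toNat (0 : Int))
    = (List.range n).map (fun i => (List.range n).foldl (fun a j =>
        if crit.getD i 0 = (PySem.List.sorted crit (fun x => x) false).getD j 0 then G (j : Int)
        else a) 0) := by
  have hrange : PySem.List.pyRange 0 (n : Int) 1 = List.map (fun k : Nat => (k : Int)) (List.range n) := by
    rw [PySem.List.pyRange_one]; simp only [sub_zero, Int.toNat_natCast, zero_add]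
  rw [hrange]
  rw [List.foldl_map]
  simp only [List.foldl_map, PySem.List.pyGetD_natCast, PySem.List.pySetD_natCast,
    Int.toNat_natCast]
  rw [pv_outerloop (fun i j => crit.getD i 0 = (PySem.List.sorted crit (fun x => x) false).getD j 0)
        (fun j => G (j : Int)) (List.range n) n n (le_refl n)]
  simp

-- In a sorted list, the last-match scan for a present value v lands on index countP (· ≤ v) − 1.
lemma pv_lastmatch (G : Int → Int) (d : Int) :
    ∀ (s : List Int), s.Pairwise (· ≤ ·) → ∀ v ∈ s, ∀ n, n = s.length →
      (List.range n).foldl (fun a j => if v = s.getD j 0 then G (j : Int) else a) d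
        = G ((s.countP (fun w => decide (w ≤ v)) - 1 : Nat) : Int) := by
  intro s
  induction s using List.reverseRecOn with
  | nil => intro _ v hv; cases hv
  | append_singleton t a ih =>
      intro hp v hv n hn
      subst hn
      have hlen : (t ++ [a]).length = t.length + 1 := by simp
      rw [hlen, List.range_succ, List.foldl_append, List.foldl_cons, List.foldl_nil]
      have hpt : t.Pairwise (· ≤ ·) := (List.pairwise_append.mp hp).1
      have hta : ∀ x ∈ t, x ≤ a := fun x hx => (List.pairwise_append.mp hp).2.2 x hx a (by simp)
      have hgetlast : (t ++ [a]).getD t.length 0 = a := by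
        rw [List.getD_eq_getElem _ _ (by simp)]
        simp
      have hinner : (List.range t.length).foldl
            (fun a' j => if v = (t ++ [a]).getD j 0 then G (j : Int) else a') d
          = (List.range t.length).foldl
            (fun a' j => if v = t.getD j 0 then G (j : Int) else a') d := by
        apply PySem.List.foldl_congr_mem
        intro acc j hj
        have hjt : j < t.length := List.mem_range.mp hj
        rw [List.getD_eq_getElem _ _ (by simp; omega), List.getD_eq_getElem _ _ hjt,
            List.getElem_append_left hjt]
      by_cases hva : v = a
      · rw [hgetlast, if_pos hva]
        have h1 : t.countP (fun w => decide (w ≤ v)) = t.length :=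
          List.countP_eq_length.mpr (fun x hx => decide_eq_true (hva ▸ hta x hx))
        rw [List.countP_append, h1]
        simp [hva]
      · rw [hgetlast, if_neg hva]
        have hvt : v ∈ t := by
          rcases List.mem_append.mp hv with h | h
          · exact h
          · simp at h; exact absurd h hva
        have hav : ¬ (a ≤ v) := fun h => hva (le_antisymm (hta v hvt) h)
        have hcount : (t ++ [a]).countP (fun w => decide (w ≤ v))
            = t.countP (fun w => decide (w ≤ v)) := by
          rw [List.countP_append]; simp [hav]
        rw [hinner, hcount, ih hpt v hvt t.length rfl]

-- B's comparison sum: the fold counts the elements satisfying the comparison.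
lemma pv_sum_le (v : Int) : ∀ (c : List Int) (a : Int),
    c.foldl (fun acc w => if w ≤ v then acc + 1 else acc) a
      = a + (c.countP (fun w => decide (w ≤ v)) : Int) := by
  intro c
  induction c with
  | nil => intro a; simp
  | cons w c ih =>
      intro a
      by_cases h : w ≤ v <;> simp only [List.foldl_cons, List.countP_cons, h, if_pos,
        decide_true, decide_false, if_false, ih] <;> push_cast <;> ring

lemma pv_sum_gt (v : Int) : ∀ (c : List Int) (a : Int),
    c.foldl (fun acc w => if v < w then acc + 1 else acc) a
      = a + (c.countP (fun w => decide (v < w)) : Int) := by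
  intro c
  induction c with
  | nil => intro a; simp
  | cons w c ih =>
      intro a
      by_cases h : v < w <;> simp only [List.foldl_cons, List.countP_cons, h, if_pos,
        decide_true, decide_false, if_false, ih] <;> push_cast <;> ring

-- Elements ≤ v and elements > v partition the list.
lemma pv_count_split (v : Int) (c : List Int) :
    c.countP (fun w => decide (w ≤ v)) + c.countP (fun w => decide (v < w)) = c.length := by
  induction c with
  | nil => simp
  | cons w c ih =>
      by_cases h : w ≤ v
      · simp [h, not_lt.mpr h]; omega
      · simp [h, lt_of_not_ge h]; omega

-- ===== VERDICT (by name: the statement is the Claim_ definition above) =====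
theorem getCriterionScore_spec : Claim_equal_getCriterionScore := by
  intro crit nb better _hdom hpre
  unfold Pre_getCriterionScore at hpre
  unfold Spec_getCriterionScore getCriterionScore getCriterionScore_alt
  by_cases hb1 : better = 1
  · have hnb : nb = (crit.length : Int) := hpre.resolve_right (fun h => h.1 hb1)
    subst hnb
    simp only [hb1, if_true]
    rw [pv_A_loops crit crit.length (fun j => j)]
    have hs : (PySem.List.sorted crit (fun x => x) false).Pairwise (· ≤ ·) :=
      PySem.List.sorted_pairwise crit (fun x => x)
    have hperm : (PySem.List.sorted crit (fun x => x) false).Perm crit :=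
      PySem.List.sorted_perm crit (fun x => x) false
    have hslen : (PySem.List.sorted crit (fun x => x) false).length = crit.length :=
      PySem.List.length_sorted crit (fun x => x) false
    apply List.ext_getElem
    · simp
    · intro i h1 h2
      simp only [List.getElem_map, List.getElem_range]
      have hi : i < crit.length := by simpa using h1
      rw [List.getD_eq_getElem crit 0 hi]
      have hv : crit[i] ∈ PySem.List.sorted crit (fun x => x) false :=
        (PySem.List.mem_sorted _ _ _ _).mpr (List.getElem_mem hi)
      rw [pv_sum_le]
      have hlm := pv_lastmatch (fun j => j) 0 _ hs crit[i] hv crit.length hslen.symm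
      beta_reduce at hlm
      rw [hlm, hperm.countP_eq]
      have hpos : 0 < crit.countP (fun w => decide (w ≤ crit[i])) :=
        List.countP_pos_iff.mpr ⟨crit[i], List.getElem_mem hi, by simp⟩
      omega
  · by_cases hb2 : better = -1
    · have hnb : nb = (crit.length : Int) := hpre.resolve_right (fun h => h.2 hb2)
      subst hnb
      simp only [hb2]
      rw [if_neg (by decide : ¬ ((-1 : Int) = 1)), if_neg (by decide : ¬ ((-1 : Int) = 1))]
      simp only [if_true]
      rw [pv_A_loops crit crit.length (fun j => ((crit.length : Int) - 1) - j)]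
      have hs : (PySem.List.sorted crit (fun x => x) false).Pairwise (· ≤ ·) :=
        PySem.List.sorted_pairwise crit (fun x => x)
      have hperm : (PySem.List.sorted crit (fun x => x) false).Perm crit :=
        PySem.List.sorted_perm crit (fun x => x) false
      have hslen : (PySem.List.sorted crit (fun x => x) false).length = crit.length :=
        PySem.List.length_sorted crit (fun x => x) false
      apply List.ext_getElem
      · simp
      · intro i h1 h2
        simp only [List.getElem_map, List.getElem_range]
        have hi : i < crit.length := by simpa using h1
        rw [List.getD_eq_getElem crit 0 hi]
        have hv : crit[i] ∈ PySem.List.sorted crit (fun x => x) false :=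
          (PySem.List.mem_sorted _ _ _ _).mpr (List.getElem_mem hi)
        rw [pv_sum_gt]
        have hlm := pv_lastmatch (fun j => ((crit.length : Int) - 1) - j) 0 _ hs crit[i] hv
          crit.length hslen.symm
        beta_reduce at hlm
        rw [hlm, hperm.countP_eq]
        have hpos : 0 < crit.countP (fun w => decide (w ≤ crit[i])) :=
          List.countP_pos_iff.mpr ⟨crit[i], List.getElem_mem hi, by simp⟩
        have hsplit := pv_count_split crit[i] crit
        omega
    · rw [if_neg hb1, if_neg hb2, if_neg hb1, if_neg hb2]
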